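-- pv_equiv track=rewrite | github.com/stoa-platform/stoa | mcp-gateway/src/k8s/watcher.py | _generate_legacy_tool_name
-- ===== SOURCE A (Python) =====
-- def _generate_legacy_tool_name(namespace: str, name: str) -> str:
--     """Generate a legacy tool name (backward compatibility).
--
--     Args:
--         namespace: Kubernetes namespace
--         name: CR name
--
--     Returns:
--         Sanitized tool name in old format {namespace}_{name}
--     """
--     raw_name = f"{namespace}_{name}"
--
--     # Sanitize: lowercase, replace invalid chars with underscore
--     sanitized = raw_name.lower()
--     sanitized = "".join(
--         c if c.isalnum() or c == "_" else "_"
--         for c in sanitized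
--     )
--
--     # Collapse multiple underscores
--     while "__" in sanitized:
--         sanitized = sanitized.replace("__", "_")
--
--     return sanitized.strip("_")
-- ===== SOURCE B (Python) =====
-- def _generate_legacy_tool_name(namespace: str, name: str) -> str:
--     s = f"{namespace}_{name}".lower()
--     tokens = []
--     buf = []
--     for c in s:
--         if c.isalnum():
--             buf.append(c)
--         elif buf:
--             tokens.append("".join(buf))
--             buf = []
--     if buf:
--         tokens.append("".join(buf))
--     return "_".join(tokens)
-- ===== Notes on version B (the rewrite author's own statement) =====
-- stated objective: alternative
-- what changed: Replaces A's three phases (per-char substitution to '_', a while-loop repeatedly replacing "__" by "_", then strip('_')) with a single boundary-detecting pass that groups consecutive alphanumeric characters into tokens and joins them with "_".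
import Mathlib
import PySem

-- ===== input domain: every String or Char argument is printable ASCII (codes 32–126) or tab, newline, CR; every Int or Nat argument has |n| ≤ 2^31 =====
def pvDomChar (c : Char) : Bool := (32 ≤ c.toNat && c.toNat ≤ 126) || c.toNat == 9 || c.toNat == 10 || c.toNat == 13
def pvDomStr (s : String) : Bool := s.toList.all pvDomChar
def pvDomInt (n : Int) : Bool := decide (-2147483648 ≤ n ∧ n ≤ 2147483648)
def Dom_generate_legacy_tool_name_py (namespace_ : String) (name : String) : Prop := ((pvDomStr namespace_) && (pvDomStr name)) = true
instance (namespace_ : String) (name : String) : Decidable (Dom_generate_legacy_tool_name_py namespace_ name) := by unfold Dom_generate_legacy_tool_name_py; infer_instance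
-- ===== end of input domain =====

-- B replaces A's three phases (per-char replace, "__"-collapse while loop, strip) by a single
-- boundary-detecting pass that groups consecutive alphanumeric characters and joins the groups with "_".

-- ===== PORT A =====
-- pvRep: Python-exact result of s.replace("__", "_") (pairs of underscores merge left-to-right);
-- pvReplace_eq_pvRep / pvRep_length_lt_of_isIn are cited by the port's decreasing_by.
def pvRep : List Char → List Char
  | [] => []
  | [c] => [c]
  | c :: d :: t => if c = '_' ∧ d = '_' then '_' :: pvRep t else c :: pvRep (d :: t)

theorem pvRep_go_eq (fuel : Nat) (l acc : List Char) (h : l.length ≤ fuel) :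
    PySem.Chars.replace.go ['_', '_'] ['_'] fuel l acc = acc.reverse ++ pvRep l := by
  induction fuel generalizing l acc with
  | zero =>
    have hl : l = [] := List.eq_nil_of_length_eq_zero (Nat.le_zero.mp h)
    subst hl; simp [PySem.Chars.replace.go, pvRep]
  | succ n ih =>
    match l with
    | [] => simp [PySem.Chars.replace.go, pvRep]
    | [c] =>
      have hp : List.isPrefixOf ['_', '_'] [c] = false := by
        simp [List.isPrefixOf]
      rw [show ∀ acc, PySem.Chars.replace.go ['_', '_'] ['_'] (n+1) [c] acc
            = PySem.Chars.replace.go ['_', '_'] ['_'] n [] (c :: acc) from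
          fun acc => by simp [PySem.Chars.replace.go, hp]]
      rw [ih [] (c :: acc) (by simp)]
      simp [pvRep]
    | c :: d :: t =>
      by_cases hcd : c = '_' ∧ d = '_'
      · obtain ⟨rfl, rfl⟩ := hcd
        have hp : List.isPrefixOf ['_', '_'] ('_' :: '_' :: t) = true := by
          simp [List.isPrefixOf]
        rw [show PySem.Chars.replace.go ['_', '_'] ['_'] (n+1) ('_' :: '_' :: t) acc
              = PySem.Chars.replace.go ['_', '_'] ['_'] n t ('_' :: acc) from by
            simp [PySem.Chars.replace.go, hp]]
        rw [ih t ('_' :: acc) (by simp at h ⊢; omega)]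
        simp [pvRep]
      · have hp : List.isPrefixOf ['_', '_'] (c :: d :: t) = false := by
          rw [Bool.eq_false_iff]
          intro h'
          have hpre : (['_', '_'] : List Char) <+: c :: d :: t := List.isPrefixOf_iff_prefix.mp h'
          obtain ⟨u, hu⟩ := hpre
          cases hu
          exact hcd ⟨rfl, rfl⟩
        rw [show PySem.Chars.replace.go ['_', '_'] ['_'] (n+1) (c :: d :: t) acc
              = PySem.Chars.replace.go ['_', '_'] ['_'] n (d :: t) (c :: acc) from by
            simp [PySem.Chars.replace.go, hp]]
        rw [ih (d :: t) (c :: acc) (by simp at h ⊢; omega)]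
        simp [pvRep, hcd]

theorem pvReplace_eq_pvRep (l : List Char) :
    PySem.Chars.replace l ['_', '_'] ['_'] = pvRep l := by
  rw [PySem.Chars.replace]
  simpa using pvRep_go_eq l.length l [] (le_refl _)

theorem pvRep_length_le (l : List Char) : (pvRep l).length ≤ l.length := by
  induction l using pvRep.induct with
  | case1 => simp [pvRep]
  | case2 c => simp [pvRep]
  | case3 c d t h ih => simp [pvRep, h]; omega
  | case4 c d t h ih => simp [pvRep, h] at ih ⊢; omega

theorem pvRep_length_lt_of_infix (l : List Char) (h : ['_', '_'] <:+: l) :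
    (pvRep l).length < l.length := by
  induction l using pvRep.induct with
  | case1 => simp at h
  | case2 c =>
    obtain ⟨s, t, hst⟩ := h
    have := congrArg List.length hst; simp at this; omega
  | case3 c d t hcd ih =>
    have := pvRep_length_le t
    simp [pvRep, hcd]; omega
  | case4 c d t hcd ih =>
    rw [List.infix_cons_iff] at h
    rcases h with hp | hi
    · exfalso
      obtain ⟨u, hu⟩ := hp
      apply hcd
      cases hu; exact ⟨rfl, rfl⟩
    · have := ih hi
      simp [pvRep, hcd] at this ⊢; omega

theorem pvCollapse_dec (s : String) (h : PySem.Str.isIn "__" s = true) :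
    (PySem.Str.replace s "__" "_").toList.length < s.toList.length := by
  rw [PySem.Str.isIn_iff_infix] at h
  have h2 : ("__".toList : List Char) = ['_', '_'] := by decide
  rw [h2] at h
  simp only [PySem.Str.replace]
  rw [String.toList_ofList]
  have h3 : ("_".toList : List Char) = ['_'] := by decide
  rw [h2, h3, pvReplace_eq_pvRep]
  exact pvRep_length_lt_of_infix _ h

-- the `while "__" in sanitized:` loop of A
def pyCollapseUnderscores (s : String) : String :=
  if PySem.Str.isIn "__" s = true then
    pyCollapseUnderscores (PySem.Str.replace s "__" "_")
  else s
termination_by s.toList.length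
decreasing_by exact pvCollapse_dec s (by assumption)

def generate_legacy_tool_name_py (namespace_ : String) (name : String) : String :=
  let raw_name := namespace_ ++ "_" ++ name
  let sanitized := PySem.Str.lower raw_name
  let sanitized := String.ofList (sanitized.toList.map
    (fun c => if PySem.Chars.isalnum c || c == '_' then c else '_'))
  let sanitized := pyCollapseUnderscores sanitized
  PySem.Str.stripChars sanitized "_"

-- ===== PORT B =====
def generate_legacy_tool_name_py_alt (namespace_ : String) (name : String) : String :=
  let s := PySem.Str.lower (namespace_ ++ "_" ++ name)
  let st := s.toList.foldl
    (fun (st : List (List Char) × List Char) c =>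
      if PySem.Chars.isalnum c then (st.1, st.2 ++ [c])
      else if st.2 ≠ [] then (st.1 ++ [st.2], []) else st)
    ([], [])
  let tokens := if st.2 ≠ [] then st.1 ++ [st.2] else st.1
  String.ofList (PySem.Chars.join ['_'] tokens)

-- ===== PRECONDITION & SPEC =====
def Spec_generate_legacy_tool_name_py (namespace_ : String) (name : String) (out : String) : Prop := out = generate_legacy_tool_name_py_alt namespace_ name
instance (namespace_ : String) (name : String) (out : String) : Decidable (Spec_generate_legacy_tool_name_py namespace_ name out) := by unfold Spec_generate_legacy_tool_name_py; infer_instance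

-- ===== CLAIM (what is proved, stated in full; the proofs are below) =====
def Claim_equal_generate_legacy_tool_name_py : Prop := ∀ (namespace_ : String) (name : String), Dom_generate_legacy_tool_name_py namespace_ name → Spec_generate_legacy_tool_name_py namespace_ name (generate_legacy_tool_name_py namespace_ name)

-- ===== LEMMAS AND PROOFS =====

-- the alnum test and the char sanitizer, on the list side
def pvP (c : Char) : Bool := PySem.Chars.isalnum c
def pvPhi (c : Char) : Char := if PySem.Chars.isalnum c || c == '_' then c else '_'

-- run-collapsing normal form of the while loop
def pvSqueeze : List Char → List Char
  | [] => []
  | [c] => [c]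
  | c :: d :: t => if c = '_' ∧ d = '_' then pvSqueeze (d :: t) else c :: pvSqueeze (d :: t)

-- token list of B's grouping pass
def pvSpec (buf : List Char) : List Char → List (List Char)
  | [] => if buf ≠ [] then [buf] else []
  | c :: t => if pvP c then pvSpec (buf ++ [c]) t
              else if buf ≠ [] then buf :: pvSpec [] t else pvSpec [] t

def pvU (c : Char) : Bool := (['_'] : List Char).contains c
def pvLstrip (l : List Char) : List Char := l.dropWhile pvU
def pvRstrip (l : List Char) : List Char := (l.reverse.dropWhile pvU).reverse

-- squeezed sanitized form of the remaining input (A's intermediate value)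
def pvQ (t : List Char) : List Char := pvSqueeze (t.map pvPhi)

theorem pvPhi_eq (c : Char) : pvPhi c = if pvP c then c else '_' := by
  by_cases h : PySem.Chars.isalnum c
  · simp [pvPhi, pvP, h]
  · by_cases h2 : c = '_' <;> simp [pvPhi, pvP, h, h2]

theorem pvP_ne_underscore {c : Char} (h : pvP c = true) : c ≠ '_' := by
  intro rfl
  have : pvP '_' = false := by decide
  rw [this] at h; cases h

theorem pvSqueeze_cons (c : Char) (a : List Char) :
    pvSqueeze (c :: a) = if c = '_' ∧ a.head? = some '_' then pvSqueeze a else c :: pvSqueeze a := by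
  cases a with
  | nil => simp [pvSqueeze]
  | cons d r =>
    by_cases h : c = '_' ∧ d = '_'
    · obtain ⟨rfl, rfl⟩ := h; simp [pvSqueeze]
    · rw [pvSqueeze, if_neg h, if_neg (by simpa using h)]

theorem pvRep_head? (l : List Char) : (pvRep l).head? = l.head? := by
  induction l using pvRep.induct with
  | case1 => simp [pvRep]
  | case2 c => simp [pvRep]
  | case3 c d t h ih => obtain ⟨rfl, rfl⟩ := h; simp [pvRep]
  | case4 c d t h ih => simp [pvRep, h]

theorem pvSqueeze_pvRep (l : List Char) : pvSqueeze (pvRep l) = pvSqueeze l := by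
  induction l using pvRep.induct with
  | case1 => simp [pvRep]
  | case2 c => simp [pvRep]
  | case3 c d t h ih =>
    obtain ⟨rfl, rfl⟩ := h
    rw [pvRep, if_pos ⟨rfl, rfl⟩]
    rw [pvSqueeze_cons, pvRep_head?, show pvSqueeze ('_' :: '_' :: t) = pvSqueeze ('_' :: t) from by rw [pvSqueeze, if_pos ⟨rfl, rfl⟩], pvSqueeze_cons, ih]
  | case4 c d t h ih =>
    rw [pvRep, if_neg h]
    rw [pvSqueeze_cons, pvRep_head?]
    simp only [List.head?_cons]
    rw [if_neg (by simpa using h), ih]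
    rw [show pvSqueeze (c :: d :: t) = c :: pvSqueeze (d :: t) from by rw [pvSqueeze, if_neg h]]

theorem pvSqueeze_of_not_infix (l : List Char) (h : ¬ (['_', '_'] <:+: l)) : pvSqueeze l = l := by
  induction l using pvSqueeze.induct with
  | case1 => simp [pvSqueeze]
  | case2 c => simp [pvSqueeze]
  | case3 c d t hcd ih =>
    exfalso; obtain ⟨rfl, rfl⟩ := hcd
    exact h ⟨[], t, rfl⟩
  | case4 c d t hcd ih =>
    rw [pvSqueeze, if_neg hcd, ih]
    intro hi
    exact h (hi.trans (List.suffix_cons c (d :: t)).isInfix)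

theorem pyCollapse_toList (s : String) : (pyCollapseUnderscores s).toList = pvSqueeze s.toList := by
  induction s using pyCollapseUnderscores.induct with
  | case1 s hin ih =>
    rw [pyCollapseUnderscores, if_pos hin, ih]
    have : (PySem.Str.replace s "__" "_").toList = pvRep s.toList := by
      simp only [PySem.Str.replace, String.toList_ofList]
      rw [show ("__".toList : List Char) = ['_', '_'] from by decide,
          show ("_".toList : List Char) = ['_'] from by decide, pvReplace_eq_pvRep]
    rw [this, pvSqueeze_pvRep]
  | case2 s hin =>
    rw [pyCollapseUnderscores, if_neg hin]
    have : ¬ (['_', '_'] <:+: s.toList) := by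
      intro hi
      apply hin
      rw [PySem.Str.isIn_iff_infix, show ("__".toList : List Char) = ['_', '_'] from by decide]
      exact hi
    rw [pvSqueeze_of_not_infix _ this]

theorem pvSpec_ne_nil (t : List Char) : ∀ buf : List Char, buf ≠ [] → pvSpec buf t ≠ [] := by
  induction t with
  | nil => intro buf h; simp [pvSpec, h]
  | cons c t ih =>
    intro buf h
    by_cases hc : pvP c
    · rw [pvSpec, if_pos hc]; exact ih _ (by simp)
    · rw [pvSpec, if_neg hc, if_pos h]; simp

theorem pvJoin_cons (sep x : List Char) (xs : List (List Char)) :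
    PySem.Chars.join sep (x :: xs) = x ++ if xs = [] then [] else sep ++ PySem.Chars.join sep xs := by
  cases xs with
  | nil => simp [PySem.Chars.join, List.intercalate]
  | cons y ys =>
    simp only [PySem.Chars.join]
    rw [if_neg (by simp)]
    exact String.ofList_inj.mp rfl

theorem pvRstrip_cons (c : Char) (x : List Char) :
    pvRstrip (c :: x) = if pvRstrip x = [] then (if pvU c then [] else [c]) else c :: pvRstrip x := by
  simp only [pvRstrip, List.reverse_cons, List.dropWhile_append]
  by_cases h : (x.reverse.dropWhile pvU).isEmpty
  · rw [if_pos h, if_pos (by simpa [List.isEmpty_iff] using h)]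
    by_cases hc : pvU c <;> simp [List.dropWhile, hc]
  · rw [if_neg h, if_neg (by simpa [List.isEmpty_iff] using h)]
    simp

theorem pvRstrip_cons_ne (c : Char) (x : List Char) (hc : pvU c = false) :
    pvRstrip (c :: x) = c :: pvRstrip x := by
  rw [pvRstrip_cons, hc]
  by_cases h : pvRstrip x = [] <;> simp [h]

theorem pvLstrip_cons_ne (c : Char) (x : List Char) (hc : pvU c = false) :
    pvLstrip (c :: x) = c :: x := by
  simp [pvLstrip, List.dropWhile, hc]

theorem pvU_underscore : pvU '_' = true := by decide

theorem pvU_of_pvP {c : Char} (h : pvP c = true) : pvU c = false := by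
  have := pvP_ne_underscore h
  simp [pvU, this]

theorem pvQ_cons_alnum (c : Char) (t : List Char) (h : pvP c = true) :
    pvQ (c :: t) = c :: pvQ t := by
  have hc : pvPhi c = c := by rw [pvPhi_eq, if_pos h]
  have hne := pvP_ne_underscore h
  simp only [pvQ, List.map_cons, hc]
  rw [pvSqueeze_cons, if_neg (by intro ⟨h1, _⟩; exact hne h1)]

theorem pvLstrip_pvQ_cons (c : Char) (t : List Char) (h : pvP c = false) :
    pvLstrip (pvQ (c :: t)) = pvLstrip (pvQ t) := by
  have hc : pvPhi c = '_' := by rw [pvPhi_eq, h]; simp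
  simp only [pvQ, List.map_cons, hc]
  rw [pvSqueeze_cons]
  by_cases hh : ('_' : Char) = '_' ∧ (t.map pvPhi).head? = some '_'
  · rw [if_pos hh]
  · rw [if_neg hh]
    simp [pvLstrip, List.dropWhile, pvU_underscore]

theorem pvS (t : List Char) :
    pvRstrip (pvSqueeze ('_' :: t.map pvPhi))
      = if pvSpec [] t = [] then [] else '_' :: pvRstrip (pvLstrip (pvQ t)) := by
  induction t with
  | nil => simp [pvSqueeze, pvRstrip, pvSpec, List.dropWhile, pvU_underscore]
  | cons d t ih =>
    by_cases hd : pvP d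
    · have hphi : pvPhi d = d := by rw [pvPhi_eq, if_pos hd]
      have hne := pvP_ne_underscore hd
      have hU := pvU_of_pvP hd
      rw [show pvSpec [] (d :: t) = pvSpec [d] t from by rw [pvSpec, if_pos hd]; rfl]
      rw [if_neg (pvSpec_ne_nil t [d] (by simp))]
      have hsq : pvSqueeze ('_' :: (d :: t).map pvPhi) = '_' :: pvQ (d :: t) := by
        simp only [List.map_cons, hphi]
        rw [pvSqueeze_cons, if_neg (by intro ⟨_, h2⟩; simp at h2; exact hne h2)]
        simp only [pvQ, List.map_cons, hphi]
      rw [hsq, pvRstrip_cons, pvU_underscore]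
      have hQ : pvQ (d :: t) = d :: pvQ t := pvQ_cons_alnum d t hd
      have hrne : pvRstrip (pvQ (d :: t)) ≠ [] := by
        rw [hQ, pvRstrip_cons_ne d _ hU]; simp
      rw [if_neg hrne]
      rw [show pvLstrip (pvQ (d :: t)) = pvQ (d :: t) from by rw [hQ]; exact pvLstrip_cons_ne d _ hU]
    · have hd' : pvP d = false := by simpa using hd
      have hphi : pvPhi d = '_' := by rw [pvPhi_eq, hd']; simp
      have hsq : pvSqueeze ('_' :: (d :: t).map pvPhi) = pvSqueeze ('_' :: t.map pvPhi) := by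
        simp only [List.map_cons, hphi]
        rw [pvSqueeze, if_pos ⟨rfl, rfl⟩]
      rw [hsq, ih]
      rw [show pvSpec [] (d :: t) = pvSpec [] t from by rw [pvSpec, if_neg hd]; simp]
      rw [pvLstrip_pvQ_cons d t hd']

theorem pvMain (t : List Char) : ∀ buf : List Char,
    PySem.Chars.join ['_'] (pvSpec buf t)
      = buf ++ pvRstrip (if buf = [] then pvLstrip (pvQ t) else pvQ t) := by
  induction t with
  | nil =>
    intro buf
    by_cases h : buf = []
    · subst h; simp [pvSpec, pvQ, pvSqueeze, pvLstrip, pvRstrip, PySem.Chars.join, List.intercalate]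
    · rw [pvSpec, if_pos h, if_neg h]
      simp [pvQ, pvSqueeze, pvRstrip, PySem.Chars.join, List.intercalate]
  | cons c t ih =>
    intro buf
    by_cases hc : pvP c
    · rw [pvSpec, if_pos hc, ih (buf ++ [c]), if_neg (by simp)]
      have hU := pvU_of_pvP hc
      have hQ := pvQ_cons_alnum c t hc
      by_cases h : buf = []
      · subst h
        rw [if_pos rfl, hQ, pvLstrip_cons_ne c _ hU, pvRstrip_cons_ne c _ hU]
        simp
      · rw [if_neg h, hQ, pvRstrip_cons_ne c _ hU]
        simp
    · by_cases h : buf = []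
      · subst h
        rw [pvSpec, if_neg hc, if_neg (by simp), ih [], if_pos rfl, if_pos rfl]
        rw [pvLstrip_pvQ_cons c t (by simpa using hc)]
      · rw [pvSpec, if_neg hc, if_pos h]
        rw [pvJoin_cons, if_neg h]
        have hphi : pvPhi c = '_' := by rw [pvPhi_eq, (by simpa using hc : pvP c = false)]; simp
        have hQc : pvQ (c :: t) = pvSqueeze ('_' :: t.map pvPhi) := by
          simp only [pvQ, List.map_cons, hphi]
        rw [hQc, pvS t]
        by_cases hs : pvSpec [] t = []
        · rw [if_pos hs, hs]
          simp
        · rw [if_neg hs, if_neg hs, ih [], if_pos rfl]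
          simp

theorem pvFold (s : List Char) : ∀ (toks : List (List Char)) (buf : List Char),
    (let st := s.foldl
        (fun (st : List (List Char) × List Char) c =>
          if PySem.Chars.isalnum c then (st.1, st.2 ++ [c])
          else if st.2 ≠ [] then (st.1 ++ [st.2], []) else st)
        (toks, buf);
     if st.2 ≠ [] then st.1 ++ [st.2] else st.1) = toks ++ pvSpec buf s := by
  induction s with
  | nil =>
    intro toks buf
    by_cases h : buf = [] <;> simp [pvSpec, h]
  | cons c s ih =>
    intro toks buf
    by_cases hc : PySem.Chars.isalnum c
    · simp only [List.foldl_cons, if_pos hc]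
      rw [ih toks (buf ++ [c])]
      rw [pvSpec, if_pos (show pvP c = true from hc)]
    · by_cases h : buf = []
      · subst h
        simp only [List.foldl_cons, if_neg hc]
        rw [if_neg (show ¬(([] : List Char) ≠ []) from fun hx => hx rfl)]
        rw [ih toks []]
        rw [pvSpec, if_neg (show ¬ pvP c = true from hc), if_neg (show ¬(([] : List Char) ≠ []) from fun hx => hx rfl)]
      · simp only [List.foldl_cons, if_neg hc]
        rw [if_pos (show buf ≠ [] from h)]
        rw [ih (toks ++ [buf]) []]
        rw [pvSpec, if_neg (show ¬ pvP c = true from hc), if_pos h]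
        simp

theorem pvStrip_eq (l : List Char) : PySem.Chars.stripChars l "_".toList = pvRstrip (pvLstrip l) := by
  rw [show ("_".toList : List Char) = ['_'] from by decide]
  rfl

-- ===== VERDICT (by name: the statement is the Claim_ definition above) =====
theorem generate_legacy_tool_name_py_spec : Claim_equal_generate_legacy_tool_name_py := by
  intro namespace_ name _
  show generate_legacy_tool_name_py namespace_ name = generate_legacy_tool_name_py_alt namespace_ name
  have hA : generate_legacy_tool_name_py namespace_ name
      = String.ofList (pvRstrip (pvLstrip (pvQ (PySem.Str.lower (namespace_ ++ "_" ++ name)).toList))) := by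
    show PySem.Str.stripChars
        (pyCollapseUnderscores (String.ofList
          (((PySem.Str.lower (namespace_ ++ "_" ++ name)).toList).map
            (fun c => if PySem.Chars.isalnum c || c == '_' then c else '_')))) "_" = _
    rw [PySem.Str.stripChars, pyCollapse_toList, String.toList_ofList, pvStrip_eq]
    rfl
  have hB : generate_legacy_tool_name_py_alt namespace_ name
      = String.ofList (PySem.Chars.join ['_']
          (pvSpec [] (PySem.Str.lower (namespace_ ++ "_" ++ name)).toList)) := by
    have h := pvFold (PySem.Str.lower (namespace_ ++ "_" ++ name)).toList [] []
    simp only [List.nil_append] at h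
    exact congrArg (fun l => String.ofList (PySem.Chars.join ['_'] l)) h
  rw [hA, hB, pvMain _ [], if_pos rfl, List.nil_append]
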